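-- pv_equiv track=rewrite | github.com/maopademiao/duee_fin | NER/ner.py | _bio_to_se
-- ===== SOURCE A (Python) =====
-- def _bio_to_se(data):
--     start_labels = ['O'] * len(data)
--     end_labels = ['O'] * len(data)
--     i = 0
--     while i < len(data):
--         if data[i][0] == 'B':
--             tag = data[i][2:]
--             start_labels[i] = tag
--             i += 1
--             while i < len(data) and data[i] == "I-" + tag:
--                 i += 1
--             i -= 1
--             end_labels[i] = tag
--         i += 1
--     return start_labels, end_labels
-- ===== SOURCE B (Python) =====
-- def _bio_to_se(data):
--     n = len(data)
--     start_labels = ['O'] * n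
--     end_labels = ['O'] * n
--     active = None  # tag of the currently open span, or None
--     for j, s in enumerate(data):
--         if active is not None:
--             if s == "I-" + active:
--                 continue
--             end_labels[j - 1] = active
--             active = None
--         if s.startswith('B'):
--             active = s[2:]
--             start_labels[j] = active
--     if active is not None:
--         end_labels[n - 1] = active
--     return start_labels, end_labels
-- ===== Notes on version B (the rewrite author's own statement) =====
-- stated objective: simpler
-- what changed: Replaces the nested while loop with index backtracking (i += 1 ... i -= 1) by a single flat forward pass carrying the open span's tag as a state variable, flushing the end label at each span boundary and once after the loop.
import Mathlib
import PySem

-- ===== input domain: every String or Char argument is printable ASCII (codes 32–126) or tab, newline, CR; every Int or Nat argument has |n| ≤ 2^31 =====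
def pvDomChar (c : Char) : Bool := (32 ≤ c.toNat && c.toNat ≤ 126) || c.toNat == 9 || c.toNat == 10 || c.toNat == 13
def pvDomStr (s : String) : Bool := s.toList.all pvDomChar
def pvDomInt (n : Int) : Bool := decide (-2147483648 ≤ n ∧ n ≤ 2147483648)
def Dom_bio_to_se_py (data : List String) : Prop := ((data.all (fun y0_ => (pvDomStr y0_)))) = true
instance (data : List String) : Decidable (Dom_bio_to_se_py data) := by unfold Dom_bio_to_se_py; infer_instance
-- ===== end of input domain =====

-- B replaces A's nested while loop with backtracking by a flat single pass carrying the
-- open span's tag as state (objective: simpler). Equivalence is about the return value only.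

-- ===== PORT A =====
-- inner while loop: `while i < len(data) and data[i] == "I-" + tag: i += 1`; returns the final i
def bioA_inner (data : List String) (tag : String) (i : Nat) : Nat :=
  if h : i < data.length ∧ data.getD i "" = "I-" ++ tag then bioA_inner data tag (i + 1)
  else i
termination_by data.length - i
decreasing_by omega

-- needed for the termination of the outer loop below
theorem bioA_inner_ge (data : List String) (tag : String) (i : Nat) :
    i ≤ bioA_inner data tag i := by
  unfold bioA_inner
  split
  · have := bioA_inner_ge data tag (i + 1); omega
  · exact le_refl i
termination_by data.length - i
decreasing_by omega

-- outer while loop of A; `data[i][0] == 'B'` is pyGet? (none on the empty string, where Python raises)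
def bioA_outer (data : List String) (st en : List String) (i : Nat) : List String × List String :=
  if h : i < data.length then
    if PySem.Str.pyGet? (data.getD i "") 0 = some 'B' then
      let tag := PySem.Str.slice (data.getD i "") (some 2) none
      let st' := st.set i tag
      let i2 := bioA_inner data tag (i + 1)
      let en' := en.set (i2 - 1) tag
      bioA_outer data st' en' ((i2 - 1) + 1)
    else bioA_outer data st en (i + 1)
  else (st, en)
termination_by data.length - i
decreasing_by
  · have := bioA_inner_ge data (PySem.Str.slice (data.getD i "") (some 2) none) (i + 1); omega
  · omega

def bio_to_se_py (data : List String) : List String × List String :=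
  bioA_outer data (List.replicate data.length "O") (List.replicate data.length "O") 0

-- ===== PORT B =====
-- B's single for-loop over (j, s) with carried state `active`; the [] case is the post-loop flush
-- (there j = len(data), so Python's `end_labels[n-1]` is `en.set (j-1)`)
def bioB_go : List String → Nat → Option String → List String → List String → List String × List String
  | [], j, active, st, en =>
    match active with
    | some t => (st, en.set (j - 1) t)
    | none => (st, en)
  | s :: rest, j, some t, st, en =>
    if s = "I-" ++ t then bioB_go rest (j + 1) (some t) st en
    else
      let en' := en.set (j - 1) t
      if PySem.Str.startswith s "B" then
        let tag := PySem.Str.slice s (some 2) none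
        bioB_go rest (j + 1) (some tag) (st.set j tag) en'
      else bioB_go rest (j + 1) none st en'
  | s :: rest, j, none, st, en =>
    if PySem.Str.startswith s "B" then
      let tag := PySem.Str.slice s (some 2) none
      bioB_go rest (j + 1) (some tag) (st.set j tag) en
    else bioB_go rest (j + 1) none st en

def bio_to_se_py_alt (data : List String) : List String × List String :=
  bioB_go data 0 none (List.replicate data.length "O") (List.replicate data.length "O")

-- ===== PRECONDITION & SPEC =====
-- A indexes data[i][0], so it raises IndexError whenever data contains an empty string; Pre_ excludes exactly those inputs.
def Pre_bio_to_se_py (data : List String) : Prop := "" ∉ data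
instance (data : List String) : Decidable (Pre_bio_to_se_py data) := by unfold Pre_bio_to_se_py; infer_instance
def pvWitness_bio_to_se_py : List String := ["B-PER", "I-PER", "O", "B-LOC"]

def Spec_bio_to_se_py (data : List String) (out : List String × List String) : Prop := out = bio_to_se_py_alt data
instance (data : List String) (out : List String × List String) : Decidable (Spec_bio_to_se_py data out) := by unfold Spec_bio_to_se_py; infer_instance

-- ===== CLAIM (what is proved, stated in full; the proofs are below) =====
def Claim_equal_bio_to_se_py : Prop := ∀ (data : List String), Dom_bio_to_se_py data → Pre_bio_to_se_py data → Spec_bio_to_se_py data (bio_to_se_py data)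

-- ===== LEMMAS AND PROOFS =====

-- a nonempty string starts with "B" iff its first character is 'B'
theorem startB_iff (s : String) (hs : s ≠ "") :
    PySem.Str.startswith s "B" = true ↔ PySem.Str.pyGet? s 0 = some 'B' := by
  have hl : s.toList ≠ [] := by simp [hs]
  cases hcs : s.toList with
  | nil => exact absurd hcs hl
  | cons c cs =>
    constructor
    · intro h
      have hpre := (PySem.Chars.startswith_iff (s := s.toList) (p := "B".toList)).mp (by simpa using h)
      rw [hcs] at hpre
      rcases hpre with ⟨t, ht⟩
      simp at ht
      have hc : c = 'B' := ht.1.symm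
      simp [pysem, hcs, hc]
    · intro h
      have hc : c = 'B' := by simp [pysem, hcs] at h; exact h
      rw [PySem.Str.startswith_eq, PySem.Chars.startswith_iff, hcs, hc]
      exact ⟨cs, rfl⟩

-- B's processing of the span continuation run equals: skip to where A's inner while stops,
-- set the end label there, and continue with no open span.
theorem span_run (data : List String) (t : String) (st en : List String) :
    ∀ f k, data.length - k ≤ f → k ≤ data.length →
      bioB_go (data.drop k) k (some t) st en
        = bioB_go (data.drop (bioA_inner data t k)) (bioA_inner data t k) none st
            (en.set (bioA_inner data t k - 1) t) := by
  intro f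
  induction f with
  | zero =>
    intro k hf hk
    have hk' : k = data.length := by omega
    subst hk'
    rw [bioA_inner]
    simp [List.drop_length, bioB_go]
  | succ f ih =>
    intro k hf hk
    by_cases h : k < data.length
    · have hdrop : data.drop k = data[k] :: data.drop (k + 1) := List.drop_eq_getElem_cons h
      by_cases hcont : data[k] = "I-" ++ t
      · rw [bioA_inner]
        rw [dif_pos ⟨h, by rw [List.getD_eq_getElem data "" h]; exact hcont⟩]
        rw [hdrop]
        show bioB_go (data[k] :: data.drop (k+1)) k (some t) st en = _
        rw [bioB_go, if_pos hcont]
        exact ih (k + 1) (by omega) (by omega)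
      · rw [bioA_inner]
        rw [dif_neg (by rw [List.getD_eq_getElem data "" h]; exact fun hc => hcont hc.2)]
        rw [hdrop]
        show bioB_go (data[k] :: data.drop (k+1)) k (some t) st en
          = bioB_go (data[k] :: data.drop (k+1)) k none st (en.set (k - 1) t)
        rw [bioB_go, if_neg hcont, bioB_go]
    · have hk' : k = data.length := by omega
      subst hk'
      rw [bioA_inner]
      simp [List.drop_length, bioB_go]

-- main invariant: A's outer loop from index i equals B's pass over data.drop i with no open span
theorem main_inv (data : List String) (hP : "" ∉ data) :
    ∀ f i st en, data.length - i ≤ f →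
      bioA_outer data st en i = bioB_go (data.drop i) i none st en := by
  intro f
  induction f with
  | zero =>
    intro i st en hf
    have : ¬ i < data.length := by omega
    rw [bioA_outer, dif_neg this, List.drop_eq_nil_of_le (by omega), bioB_go]
  | succ f ih =>
    intro i st en hf
    by_cases h : i < data.length
    · have hdrop : data.drop i = data[i] :: data.drop (i + 1) := List.drop_eq_getElem_cons h
      have hne : data[i] ≠ "" := fun hc => hP (hc ▸ List.getElem_mem h)
      have hgd : data.getD i "" = data[i] := List.getD_eq_getElem data "" h
      rw [bioA_outer, dif_pos h, hdrop]
      show _ = bioB_go (data[i] :: data.drop (i+1)) i none st en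
      rw [bioB_go]
      by_cases hB : PySem.Str.pyGet? (data[i]) 0 = some 'B'
      · rw [if_pos (by rw [hgd]; exact hB), if_pos ((startB_iff data[i] hne).mpr hB)]
        simp only [hgd]
        set tag := PySem.Str.slice data[i] (some 2) none with htag
        have hge := bioA_inner_ge data tag (i + 1)
        set m := bioA_inner data tag (i + 1) with hm
        have hrun := span_run data tag (st.set i tag) en (data.length - (i+1)) (i + 1) (le_refl _) (by omega)
        rw [← hm] at hrun
        rw [hrun]
        have hmm : (m - 1) + 1 = m := by omega
        rw [hmm]
        exact ih m (st.set i tag) (en.set (m - 1) tag) (by omega)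
      · rw [if_neg (by rw [hgd]; exact hB),
            if_neg (fun hc => hB ((startB_iff data[i] hne).mp hc))]
        exact ih (i + 1) st en (by omega)
    · rw [bioA_outer, dif_neg h, List.drop_eq_nil_of_le (by omega), bioB_go]

-- ===== VERDICT (by name: the statement is the Claim_ definition above) =====
theorem bio_to_se_py_spec : Claim_equal_bio_to_se_py := by
  intro data _ hP
  show bio_to_se_py data = bio_to_se_py_alt data
  unfold bio_to_se_py bio_to_se_py_alt
  have := main_inv data hP data.length 0
    (List.replicate data.length "O") (List.replicate data.length "O") (by omega)
  simpa using this
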